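-- pv_equiv track=rewrite | github.com/Haroong/Algorithm | BaekJoon Online Judge/Silver/16401-과자 나눠주기.py | divide_snack
-- ===== SOURCE A (Python) =====
-- def divide_snack(snacks, people):
--     start = 1
--     end = snacks[-1]
--     answer = 0
--
--     while start <= end:
--         mid = (start + end) // 2
--         given_count = 0 # 과자를 받은 사람의 수
--
--         if mid == 0:
--             return end
--
--         # mid 길이만큼 과자 나누기
--         for snack in snacks:
--             if snack >= mid:
--                 given_count += snack // mid
--
--         if given_count < people: # 목표한 인원만큼 나눠줬거나 과자가 부족한 경우
--             end = mid - 1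
--         else:
--             answer = mid # 과자가 남은 경우
--             start = mid + 1
--
--     return answer
-- ===== SOURCE B (Python) =====
-- def divide_snack(snacks, people):
--     def feasible(m):
--         return sum(s // m for s in snacks if s >= m) >= people
--
--     def search(lo, hi):
--         if lo >= hi:
--             return lo
--         mid = (lo + hi + 1) // 2
--         return search(mid, hi) if feasible(mid) else search(lo, mid - 1)
--
--     return search(0, snacks[-1])
-- ===== Notes on version B (the rewrite author's own statement) =====
-- stated objective: simpler
-- what changed: Replaced the iterative answer-accumulating binary search (start/end/answer state with a dead mid==0 guard and an explicit counting loop) by a recursive accumulator-free lower-bound binary search on [0, snacks[-1]] with mid=(lo+hi+1)//2 whose returned lo IS the answer, counting recipients with a sum comprehension.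
import Mathlib
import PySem

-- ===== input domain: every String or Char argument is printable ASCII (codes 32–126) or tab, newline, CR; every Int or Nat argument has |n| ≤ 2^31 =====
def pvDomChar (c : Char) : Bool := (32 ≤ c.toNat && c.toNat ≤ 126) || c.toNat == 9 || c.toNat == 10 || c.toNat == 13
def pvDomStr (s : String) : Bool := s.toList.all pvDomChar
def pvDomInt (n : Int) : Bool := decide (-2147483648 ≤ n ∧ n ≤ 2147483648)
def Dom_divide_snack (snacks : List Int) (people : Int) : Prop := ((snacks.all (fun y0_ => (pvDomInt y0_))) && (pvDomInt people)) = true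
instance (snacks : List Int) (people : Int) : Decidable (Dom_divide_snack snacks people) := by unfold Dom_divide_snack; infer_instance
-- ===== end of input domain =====

-- B replaces A's iterative answer-accumulating binary search by a recursive accumulator-free
-- lower-bound binary search (mid = (lo+hi+1)//2, returned lo is the answer): simpler, same cost.


-- ===== PORT A =====
-- A's inner counting loop: given_count accumulated over snacks
def pvCountA (snacks : List Int) (mid : Int) : Int :=
  snacks.foldl (fun gc snack => if snack ≥ mid then gc + PySem.Int.floordiv snack mid else gc) 0

-- A's while-loop over the state (start, e, answer), including the mid == 0 → return e guard
def pvLoopA (snacks : List Int) (people : Int) (start e answer : Int) : Int :=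
  if _h : start ≤ e then
    let mid := PySem.Int.floordiv (start + e) 2
    if mid = 0 then e
    else if pvCountA snacks mid < people then
      pvLoopA snacks people start (mid - 1) answer
    else
      pvLoopA snacks people (mid + 1) e mid
  else answer
  termination_by (e - start + 1).toNat
  decreasing_by
  · have hb := PySem.Int.floordiv_two_mid_bounds _h
    omega
  · have hb := PySem.Int.floordiv_two_mid_bounds _h
    omega

def divide_snack (snacks : List Int) (people : Int) : Int :=
  pvLoopA snacks people 1 ((PySem.List.pyGet? snacks (-1)).getD 0) 0

-- ===== PORT B =====
-- B's feasibility count: sum comprehension over snacks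
def pvCountB (snacks : List Int) (m : Int) : Int :=
  ((snacks.filter (fun s => s ≥ m)).map (fun s => PySem.Int.floordiv s m)).sum

-- B's recursive accumulator-free search over [lo, hi]
def pvSearchB (snacks : List Int) (people : Int) (lo hi : Int) : Int :=
  if _h : lo < hi then
    let mid := PySem.Int.floordiv (lo + hi + 1) 2
    if people ≤ pvCountB snacks mid then pvSearchB snacks people mid hi
    else pvSearchB snacks people lo (mid - 1)
  else lo
  termination_by (hi - lo).toNat
  decreasing_by
  · have he : lo + hi + 1 = (lo + 1) + hi := by ring
    rw [he] at *
    have hb := PySem.Int.floordiv_two_mid_bounds (show lo + 1 ≤ hi by omega)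
    omega
  · have he : lo + hi + 1 = (lo + 1) + hi := by ring
    rw [he] at *
    have hb := PySem.Int.floordiv_two_mid_bounds (show lo + 1 ≤ hi by omega)
    omega

def divide_snack_alt (snacks : List Int) (people : Int) : Int :=
  pvSearchB snacks people 0 ((PySem.List.pyGet? snacks (-1)).getD 0)

-- ===== PRECONDITION & SPEC =====
-- A raises IndexError on snacks = [] (snacks[-1]); that input is excluded.
def Pre_divide_snack (snacks : List Int) (people : Int) : Prop := snacks ≠ []
instance (snacks : List Int) (people : Int) : Decidable (Pre_divide_snack snacks people) := by
  unfold Pre_divide_snack; infer_instance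

def pvWitness_divide_snack : List Int × Int := ([1, 4, 5], 3)

def Spec_divide_snack (snacks : List Int) (people : Int) (out : Int) : Prop := out = divide_snack_alt snacks people
instance (snacks : List Int) (people : Int) (out : Int) : Decidable (Spec_divide_snack snacks people out) := by unfold Spec_divide_snack; infer_instance

-- ===== CLAIM (what is proved, stated in full; the proofs are below) =====
def Claim_equal_divide_snack : Prop := ∀ (snacks : List Int) (people : Int), Dom_divide_snack snacks people → Pre_divide_snack snacks people → Spec_divide_snack snacks people (divide_snack snacks people)

-- ===== LEMMAS AND PROOFS =====

theorem pvCountA_foldl (snacks : List Int) (m acc : Int) :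
    snacks.foldl (fun gc snack => if snack ≥ m then gc + PySem.Int.floordiv snack m else gc) acc
      = acc + pvCountB snacks m := by
  induction snacks generalizing acc with
  | nil => simp [pvCountB]
  | cons s t ih =>
    by_cases hs : s ≥ m
    · simp [hs, ih, pvCountB]
      ring
    · simp [hs, ih, pvCountB]

theorem pvCountA_eq_pvCountB (snacks : List Int) (m : Int) :
    pvCountA snacks m = pvCountB snacks m := by
  have := pvCountA_foldl snacks m 0
  simpa [pvCountA] using this

-- Bisimulation: A's state always satisfies start = answer + 1, and then A's loop is B's search.
theorem pvLoopA_eq_pvSearchB (snacks : List Int) (people : Int) (lo e : Int) (hlo : 0 ≤ lo) :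
    pvLoopA snacks people (lo + 1) e lo = pvSearchB snacks people lo e := by
  rw [pvLoopA.eq_def, pvSearchB.eq_def]
  by_cases h : lo < e
  · have h1 : lo + 1 ≤ e := by omega
    rw [dif_pos h1, dif_pos h]
    have he : lo + e + 1 = (lo + 1) + e := by ring
    have hb := PySem.Int.floordiv_two_mid_bounds h1
    rw [he]
    simp only
    set m := PySem.Int.floordiv (lo + 1 + e) 2 with hm
    have hm1 : lo + 1 ≤ m := hb.1
    have hm2 : m ≤ e := hb.2
    rw [if_neg (show ¬ m = 0 by omega), pvCountA_eq_pvCountB]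
    by_cases hc : pvCountB snacks m < people
    · rw [if_pos hc, if_neg (by omega)]
      exact pvLoopA_eq_pvSearchB snacks people lo (m - 1) hlo
    · rw [if_neg hc, if_pos (by omega)]
      exact pvLoopA_eq_pvSearchB snacks people m e (by omega)
  · rw [dif_neg (by omega), dif_neg h]
  termination_by (e - lo + 1).toNat
  decreasing_by
  · omega
  · omega

-- ===== VERDICT (by name: the statement is the Claim_ definition above) =====
theorem divide_snack_spec : Claim_equal_divide_snack := by
  intro snacks people _ _
  unfold Spec_divide_snack divide_snack divide_snack_alt
  simpa using pvLoopA_eq_pvSearchB snacks people 0 ((PySem.List.pyGet? snacks (-1)).getD 0) le_rfl
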